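-- pv_equiv track=rewrite | github.com/Half-chahan/JishuPro_BashO | pedge13.py | allocate_points
-- ===== SOURCE A (Python) =====
-- def allocate_points(target_total: int, has_glasses: bool):
--     alloc = {
--         "oval": 16,
--         "lips": 10,
--         "nose": 8,   # ← 鼻が消えやすいので増やす
--         "lbrow": 5,
--         "rbrow": 5,
--         "leye": 4,
--         "reye": 4,
--         "glasses": 0,
--         "bg": 0
--     }
--     if has_glasses:
--         alloc["glasses"] = 26   # ← 左右レンズ(閉)＋ブリッジで増やす
--         alloc["leye"] = 3
--         alloc["reye"] = 3
--
--     order = ["bg", "nose", "lbrow", "rbrow", "leye", "reye", "lips", "glasses", "oval"]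
--     def total(a): return sum(max(0, v) for v in a.values())
--
--     while total(alloc) > target_total:
--         reduced = False
--         for k in order:
--             if alloc.get(k, 0) > 2 and total(alloc) > target_total:
--                 alloc[k] -= 1
--                 reduced = True
--         if not reduced:
--             break
--
--     alloc["oval"] = max(10, alloc["oval"])
--     alloc["lips"] = max(6, alloc["lips"])
--     alloc["nose"] = max(6, alloc["nose"])
--     if has_glasses:
--         alloc["glasses"] = max(18, alloc["glasses"])
--     return alloc
-- ===== SOURCE B (Python) =====
-- def allocate_points(target_total: int, has_glasses: bool):
--     base = [("oval", 16), ("lips", 10), ("nose", 8), ("lbrow", 5), ("rbrow", 5),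
--             ("leye", 4 if not has_glasses else 3), ("reye", 4 if not has_glasses else 3),
--             ("glasses", 26 if has_glasses else 0), ("bg", 0)]
--     alloc = dict(base)
--     order = ["bg", "nose", "lbrow", "rbrow", "leye", "reye", "lips", "glasses", "oval"]
--     excess = sum(v for v in alloc.values()) - target_total
--     if excess > 0:
--         # capacity of each key down to the floor of 2 (keys at <=2 never shrink)
--         cap = {k: alloc[k] - 2 for k in order if alloc[k] > 2}
--         e = min(excess, sum(cap.values()))
--         # drain e units round-robin in `order`: whole rounds in bulk, then one partial round
--         while e > 0:
--             eligible = [k for k in order if cap.get(k, 0) > 0]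
--             n = len(eligible)
--             if n == 0:
--                 break
--             if e < n:
--                 for k in eligible[:e]:
--                     alloc[k] -= 1
--                     cap[k] -= 1
--                 e = 0
--             else:
--                 r = min(e // n, min(cap[k] for k in eligible))
--                 for k in eligible:
--                     alloc[k] -= r
--                     cap[k] -= r
--                 e -= r * n
--         cap = None
--     alloc["oval"] = max(10, alloc["oval"])
--     alloc["lips"] = max(6, alloc["lips"])
--     alloc["nose"] = max(6, alloc["nose"])
--     if has_glasses:
--         alloc["glasses"] = max(18, alloc["glasses"])
--     return alloc
-- ===== Notes on version B (the rewrite author's own statement) =====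
-- stated objective: alternative
-- what changed: A drains the budget one point per key per pass, re-summing the whole dict before every decrement; B computes the excess and per-key capacities once and distributes the reductions arithmetically - whole round-robin rounds subtracted in bulk, then one partial round along the order list - before applying the same clamps.
import Mathlib
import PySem

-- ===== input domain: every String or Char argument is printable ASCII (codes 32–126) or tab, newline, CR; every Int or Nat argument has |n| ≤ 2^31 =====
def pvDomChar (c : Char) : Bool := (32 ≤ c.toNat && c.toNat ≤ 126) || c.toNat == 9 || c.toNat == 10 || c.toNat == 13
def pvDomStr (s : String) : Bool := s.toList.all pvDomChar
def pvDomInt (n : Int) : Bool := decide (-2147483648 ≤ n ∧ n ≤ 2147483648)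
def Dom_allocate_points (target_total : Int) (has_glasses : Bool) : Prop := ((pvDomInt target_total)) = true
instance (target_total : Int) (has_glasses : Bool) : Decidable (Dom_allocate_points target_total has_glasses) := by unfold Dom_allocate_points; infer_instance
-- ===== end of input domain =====

-- B replaces A's one-at-a-time round-robin draining loop with a counted bulk-round reduction
-- (whole rounds subtracted arithmetically, then one partial round); objective: alternative.

-- ===== PORT A =====

def pvOrder : List String := ["bg", "nose", "lbrow", "rbrow", "leye", "reye", "lips", "glasses", "oval"]

-- total(a) = sum(max(0, v) for v in a.values())
def pvTotalA (d : PySem.Dict String Int) : Int := (d.values.map (fun v => max 0 v)).sum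

-- one `for k in order` pass; state = (alloc, reduced)
def pvPassA (t : Int) (d : PySem.Dict String Int) : PySem.Dict String Int × Bool :=
  pvOrder.foldl
    (fun st k =>
      if st.1.getD k 0 > 2 ∧ pvTotalA st.1 > t then
        (st.1.insert k (st.1.getD k 0 - 1), true)
      else st)
    (d, false)

-- the while loop; fuel 100 suffices (each productive pass lowers the total, which starts ≤ 76)
def pvLoopA : Nat → Int → PySem.Dict String Int → PySem.Dict String Int
  | 0, _, d => d
  | n + 1, t, d =>
    if pvTotalA d > t then
      let p := pvPassA t d
      if p.2 then pvLoopA n t p.1 else p.1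
    else d

def allocate_points (target_total : Int) (has_glasses : Bool) : List (String × Int) :=
  let alloc : PySem.Dict String Int :=
    PySem.Dict.ofList [("oval", 16), ("lips", 10), ("nose", 8), ("lbrow", 5), ("rbrow", 5),
                       ("leye", 4), ("reye", 4), ("glasses", 0), ("bg", 0)]
  let alloc := if has_glasses then
      ((alloc.insert "glasses" 26).insert "leye" 3).insert "reye" 3
    else alloc
  let alloc := pvLoopA 100 target_total alloc
  let alloc := alloc.insert "oval" (max 10 (alloc.getD "oval" 0))
  let alloc := alloc.insert "lips" (max 6 (alloc.getD "lips" 0))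
  let alloc := alloc.insert "nose" (max 6 (alloc.getD "nose" 0))
  let alloc := if has_glasses then alloc.insert "glasses" (max 18 (alloc.getD "glasses" 0)) else alloc
  alloc.items

-- ===== PORT B =====

-- the bulk-round while loop of Source B; state (alloc, cap, e); fuel 20 suffices
def pvLoopB : Nat → PySem.Dict String Int → PySem.Dict String Int → Int → PySem.Dict String Int
  | 0, alloc, _, _ => alloc
  | n + 1, alloc, cap, e =>
    if e > 0 then
      let eligible := pvOrder.filter (fun k => cap.getD k 0 > 0)
      let nn : Int := PySem.List.len eligible
      if nn = 0 then alloc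
      else if e < nn then
        -- eligible[:e] with 0 < e: List.take is exact here
        let st := (eligible.take e.toNat).foldl
          (fun (st : PySem.Dict String Int × PySem.Dict String Int) k =>
            (st.1.insert k (st.1.getD k 0 - 1), st.2.insert k (st.2.getD k 0 - 1)))
          (alloc, cap)
        pvLoopB n st.1 st.2 0
      else
        let r := min (PySem.Int.floordiv e nn)
                     (((PySem.List.min? (eligible.map (fun k => cap.getD k 0)) (fun x => x)).getD 0))
        let st := eligible.foldl
          (fun (st : PySem.Dict String Int × PySem.Dict String Int) k =>
            (st.1.insert k (st.1.getD k 0 - r), st.2.insert k (st.2.getD k 0 - r)))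
          (alloc, cap)
        pvLoopB n st.1 st.2 (e - r * nn)
    else alloc

def allocate_points_alt (target_total : Int) (has_glasses : Bool) : List (String × Int) :=
  let base : List (String × Int) :=
    [("oval", 16), ("lips", 10), ("nose", 8), ("lbrow", 5), ("rbrow", 5),
     ("leye", if !has_glasses then 4 else 3), ("reye", if !has_glasses then 4 else 3),
     ("glasses", if has_glasses then 26 else 0), ("bg", 0)]
  let alloc : PySem.Dict String Int := PySem.Dict.ofList base
  let excess := alloc.values.sum - target_total
  let alloc :=
    if excess > 0 then
      let cap : PySem.Dict String Int :=
        pvOrder.foldl (fun c k => if alloc.getD k 0 > 2 then c.insert k (alloc.getD k 0 - 2) else c)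
          PySem.Dict.empty
      let e := min excess cap.values.sum
      pvLoopB 20 alloc cap e
    else alloc
  let alloc := alloc.insert "oval" (max 10 (alloc.getD "oval" 0))
  let alloc := alloc.insert "lips" (max 6 (alloc.getD "lips" 0))
  let alloc := alloc.insert "nose" (max 6 (alloc.getD "nose" 0))
  let alloc := if has_glasses then alloc.insert "glasses" (max 18 (alloc.getD "glasses" 0)) else alloc
  alloc.items

-- ===== PRECONDITION & SPEC =====
def Spec_allocate_points (target_total : Int) (has_glasses : Bool) (out : List (String × Int)) : Prop := out = allocate_points_alt target_total has_glasses
instance (target_total : Int) (has_glasses : Bool) (out : List (String × Int)) : Decidable (Spec_allocate_points target_total has_glasses out) := by unfold Spec_allocate_points; infer_instance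

-- ===== CLAIM (what is proved, stated in full; the proofs are below) =====
def Claim_equal_allocate_points : Prop := ∀ (target_total : Int) (has_glasses : Bool), Dom_allocate_points target_total has_glasses → Spec_allocate_points target_total has_glasses (allocate_points target_total has_glasses)


-- ===== LEMMAS AND PROOFS =====

-- the refusal floor of a value under A's draining loop
def pvFlr (v : Int) : Int := if v > 2 then 2 else max 0 v

-- least total A's loop can reach from d: every value drained to its floor
def pvMin (d : PySem.Dict String Int) : Int := (d.values.map pvFlr).sum

theorem pvMin_le_total (d : PySem.Dict String Int) : pvMin d ≤ pvTotalA d := by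
  unfold pvMin pvTotalA
  apply List.sum_le_sum
  intro v _
  unfold pvFlr; split_ifs <;> omega

theorem pvMin_insert (d : PySem.Dict String Int) (k : String)
    (hnd : d.keys.Nodup) (h : d.getD k 0 > 2) :
    pvMin (d.insert k (d.getD k 0 - 1)) = pvMin d := by
  have hc : d.contains k = true := by
    by_contra hne
    have := PySem.Dict.getD_of_not_contains d (k := k) 0 (by
      cases hcc : d.contains k
      · rfl
      · exact absurd hcc hne)
    omega
  show (((d.insert k (d.getD k 0 - 1)).items.map (·.2)).map pvFlr).sum
      = ((d.items.map (·.2)).map pvFlr).sum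
  rw [PySem.Dict.items_insert_of_contains d _ hc, List.map_map, List.map_map, List.map_map]
  congr 1
  apply List.map_congr_left
  intro p hp
  by_cases hk : p.1 = k
  · have hv : d.getD p.1 0 = p.2 := by
      exact PySem.Dict.getD_of_mem_items d (by simpa using hp) hnd 0
    simp only [Function.comp, hk, beq_self_eq_true, if_true]
    rw [hk] at hv
    unfold pvFlr
    split_ifs <;> omega
  · simp only [Function.comp]
    rw [if_neg (by simpa using hk)]

theorem pvFoldA_congr (ks : List String) (t t' : Int)
    (st : PySem.Dict String Int × Bool)
    (hnd : st.1.keys.Nodup) (ht : t < pvMin st.1) (ht' : t' < pvMin st.1) :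
    (ks.foldl (fun st k => if st.1.getD k 0 > 2 ∧ pvTotalA st.1 > t then
        (st.1.insert k (st.1.getD k 0 - 1), true) else st) st
      = ks.foldl (fun st k => if st.1.getD k 0 > 2 ∧ pvTotalA st.1 > t' then
        (st.1.insert k (st.1.getD k 0 - 1), true) else st) st)
    ∧ (ks.foldl (fun st k => if st.1.getD k 0 > 2 ∧ pvTotalA st.1 > t then
        (st.1.insert k (st.1.getD k 0 - 1), true) else st) st).1.keys.Nodup
    ∧ pvMin (ks.foldl (fun st k => if st.1.getD k 0 > 2 ∧ pvTotalA st.1 > t then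
        (st.1.insert k (st.1.getD k 0 - 1), true) else st) st).1 = pvMin st.1 := by
  induction ks generalizing st with
  | nil => exact ⟨rfl, hnd, rfl⟩
  | cons k ks ih =>
    have htot : pvTotalA st.1 > t := lt_of_lt_of_le ht (pvMin_le_total st.1)
    have htot' : pvTotalA st.1 > t' := lt_of_lt_of_le ht' (pvMin_le_total st.1)
    by_cases hk : st.1.getD k 0 > 2
    · simp only [List.foldl_cons, if_pos (And.intro hk htot), if_pos (And.intro hk htot')]
      have hmin := pvMin_insert st.1 k hnd hk
      have hnd' := PySem.Dict.nodup_keys_insert st.1 k (st.1.getD k 0 - 1) hnd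
      have := ih (st := (st.1.insert k (st.1.getD k 0 - 1), true))
        hnd' (by rw [hmin]; exact ht) (by rw [hmin]; exact ht')
      exact ⟨this.1, this.2.1, by rw [this.2.2]; exact hmin⟩
    · simp only [List.foldl_cons,
        if_neg (fun (hh : _ ∧ _) => hk hh.1)]
      exact ih st hnd ht ht'

theorem pvPassA_congr (t t' : Int) (d : PySem.Dict String Int)
    (hnd : d.keys.Nodup) (ht : t < pvMin d) (ht' : t' < pvMin d) :
    pvPassA t d = pvPassA t' d
    ∧ (pvPassA t d).1.keys.Nodup ∧ pvMin (pvPassA t d).1 = pvMin d :=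
  pvFoldA_congr pvOrder t t' (d, false) hnd ht ht'

theorem pvLoopA_congr (n : Nat) (t t' : Int) (d : PySem.Dict String Int)
    (hnd : d.keys.Nodup) (ht : t < pvMin d) (ht' : t' < pvMin d) :
    pvLoopA n t d = pvLoopA n t' d := by
  induction n generalizing d with
  | zero => rfl
  | succ n ih =>
    have htot : pvTotalA d > t := lt_of_lt_of_le ht (pvMin_le_total d)
    have htot' : pvTotalA d > t' := lt_of_lt_of_le ht' (pvMin_le_total d)
    have hp := pvPassA_congr t t' d hnd ht ht'
    rw [pvLoopA, pvLoopA, if_pos htot, if_pos htot', ← hp.1]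
    by_cases hr : (pvPassA t d).2
    · simp only [hr, if_true]
      exact ih (pvPassA t d).1 hp.2.1 (by rw [hp.2.2]; exact ht) (by rw [hp.2.2]; exact ht')
    · simp only [hr, if_false, Bool.false_eq_true]

theorem pvLoopA_stop (n : Nat) (t : Int) (d : PySem.Dict String Int)
    (h : ¬ pvTotalA d > t) : pvLoopA n t d = d := by
  cases n with
  | zero => rfl
  | succ n => rw [pvLoopA, if_neg h]

theorem A_tail_false (t t' : Int) (ht : t < 14) (ht' : t' < 14) :
    allocate_points t false = allocate_points t' false := by
  have hmin : pvMin (PySem.Dict.ofList (ν := Int) [("oval", 16), ("lips", 10), ("nose", 8), ("lbrow", 5), ("rbrow", 5), ("leye", 4), ("reye", 4), ("glasses", 0), ("bg", 0)]) = 14 := by decide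
  have h := pvLoopA_congr 100 t t' (PySem.Dict.ofList (ν := Int) [("oval", 16), ("lips", 10), ("nose", 8), ("lbrow", 5), ("rbrow", 5), ("leye", 4), ("reye", 4), ("glasses", 0), ("bg", 0)]) (by decide) (by omega) (by omega)
  simp [allocate_points, h]

theorem A_hi_false (t t' : Int) (ht : 52 ≤ t) (ht' : 52 ≤ t') :
    allocate_points t false = allocate_points t' false := by
  have htt : pvTotalA (PySem.Dict.ofList (ν := Int) [("oval", 16), ("lips", 10), ("nose", 8), ("lbrow", 5), ("rbrow", 5), ("leye", 4), ("reye", 4), ("glasses", 0), ("bg", 0)]) = 52 := by decide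
  have h1 := pvLoopA_stop 100 t (PySem.Dict.ofList (ν := Int) [("oval", 16), ("lips", 10), ("nose", 8), ("lbrow", 5), ("rbrow", 5), ("leye", 4), ("reye", 4), ("glasses", 0), ("bg", 0)]) (by omega)
  have h2 := pvLoopA_stop 100 t' (PySem.Dict.ofList (ν := Int) [("oval", 16), ("lips", 10), ("nose", 8), ("lbrow", 5), ("rbrow", 5), ("leye", 4), ("reye", 4), ("glasses", 0), ("bg", 0)]) (by omega)
  simp [allocate_points, h1, h2]

theorem A_tail_true (t t' : Int) (ht : t < 16) (ht' : t' < 16) :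
    allocate_points t true = allocate_points t' true := by
  have hmin : pvMin ((((PySem.Dict.ofList (ν := Int) [("oval", 16), ("lips", 10), ("nose", 8), ("lbrow", 5), ("rbrow", 5), ("leye", 4), ("reye", 4), ("glasses", 0), ("bg", 0)]).insert "glasses" 26).insert "leye" 3).insert "reye" 3) = 16 := by decide
  have h := pvLoopA_congr 100 t t' ((((PySem.Dict.ofList (ν := Int) [("oval", 16), ("lips", 10), ("nose", 8), ("lbrow", 5), ("rbrow", 5), ("leye", 4), ("reye", 4), ("glasses", 0), ("bg", 0)]).insert "glasses" 26).insert "leye" 3).insert "reye" 3) (by decide) (by omega) (by omega)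
  simp [allocate_points, h]

theorem A_hi_true (t t' : Int) (ht : 76 ≤ t) (ht' : 76 ≤ t') :
    allocate_points t true = allocate_points t' true := by
  have htt : pvTotalA ((((PySem.Dict.ofList (ν := Int) [("oval", 16), ("lips", 10), ("nose", 8), ("lbrow", 5), ("rbrow", 5), ("leye", 4), ("reye", 4), ("glasses", 0), ("bg", 0)]).insert "glasses" 26).insert "leye" 3).insert "reye" 3) = 76 := by decide
  have h1 := pvLoopA_stop 100 t ((((PySem.Dict.ofList (ν := Int) [("oval", 16), ("lips", 10), ("nose", 8), ("lbrow", 5), ("rbrow", 5), ("leye", 4), ("reye", 4), ("glasses", 0), ("bg", 0)]).insert "glasses" 26).insert "leye" 3).insert "reye" 3) (by omega)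
  have h2 := pvLoopA_stop 100 t' ((((PySem.Dict.ofList (ν := Int) [("oval", 16), ("lips", 10), ("nose", 8), ("lbrow", 5), ("rbrow", 5), ("leye", 4), ("reye", 4), ("glasses", 0), ("bg", 0)]).insert "glasses" 26).insert "leye" 3).insert "reye" 3) (by omega)
  simp [allocate_points, h1, h2]

theorem alt_tail_false (t t' : Int) (ht : t < 14) (ht' : t' < 14) :
    allocate_points_alt t false = allocate_points_alt t' false := by
  have hS : (PySem.Dict.ofList (ν := Int) [("oval", 16), ("lips", 10), ("nose", 8), ("lbrow", 5), ("rbrow", 5), ("leye", 4), ("reye", 4), ("glasses", 0), ("bg", 0)]).values.sum = 52 := by decide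
  have hC : (List.foldl (fun c k => if 2 < (PySem.Dict.ofList (ν := Int) [("oval", 16), ("lips", 10), ("nose", 8), ("lbrow", 5), ("rbrow", 5), ("leye", 4), ("reye", 4), ("glasses", 0), ("bg", 0)]).getD k 0 then c.insert k ((PySem.Dict.ofList (ν := Int) [("oval", 16), ("lips", 10), ("nose", 8), ("lbrow", 5), ("rbrow", 5), ("leye", 4), ("reye", 4), ("glasses", 0), ("bg", 0)]).getD k 0 - 2) else c) PySem.Dict.empty pvOrder).values.sum = 38 := by decide
  simp [allocate_points_alt]
  rw [hS, hC]
  rw [if_pos (show t < (52:Int) by omega), if_pos (show t' < (52:Int) by omega),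
     show min (52 - t) (38:Int) = 38 from by omega, show min (52 - t') (38:Int) = 38 from by omega]

theorem alt_hi_false (t t' : Int) (ht : 52 ≤ t) (ht' : 52 ≤ t') :
    allocate_points_alt t false = allocate_points_alt t' false := by
  have hS : (PySem.Dict.ofList (ν := Int) [("oval", 16), ("lips", 10), ("nose", 8), ("lbrow", 5), ("rbrow", 5), ("leye", 4), ("reye", 4), ("glasses", 0), ("bg", 0)]).values.sum = 52 := by decide
  simp [allocate_points_alt]
  rw [hS]
  rw [if_neg (show ¬ t < (52:Int) by omega), if_neg (show ¬ t' < (52:Int) by omega)]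

theorem alt_tail_true (t t' : Int) (ht : t < 16) (ht' : t' < 16) :
    allocate_points_alt t true = allocate_points_alt t' true := by
  have hS : (PySem.Dict.ofList (ν := Int) [("oval", 16), ("lips", 10), ("nose", 8), ("lbrow", 5), ("rbrow", 5), ("leye", 3), ("reye", 3), ("glasses", 26), ("bg", 0)]).values.sum = 76 := by decide
  have hC : (List.foldl (fun c k => if 2 < (PySem.Dict.ofList (ν := Int) [("oval", 16), ("lips", 10), ("nose", 8), ("lbrow", 5), ("rbrow", 5), ("leye", 3), ("reye", 3), ("glasses", 26), ("bg", 0)]).getD k 0 then c.insert k ((PySem.Dict.ofList (ν := Int) [("oval", 16), ("lips", 10), ("nose", 8), ("lbrow", 5), ("rbrow", 5), ("leye", 3), ("reye", 3), ("glasses", 26), ("bg", 0)]).getD k 0 - 2) else c) PySem.Dict.empty pvOrder).values.sum = 60 := by decide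
  simp [allocate_points_alt]
  rw [hS, hC]
  rw [if_pos (show t < (76:Int) by omega), if_pos (show t' < (76:Int) by omega),
     show min (76 - t) (60:Int) = 60 from by omega, show min (76 - t') (60:Int) = 60 from by omega]

theorem alt_hi_true (t t' : Int) (ht : 76 ≤ t) (ht' : 76 ≤ t') :
    allocate_points_alt t true = allocate_points_alt t' true := by
  have hS : (PySem.Dict.ofList (ν := Int) [("oval", 16), ("lips", 10), ("nose", 8), ("lbrow", 5), ("rbrow", 5), ("leye", 3), ("reye", 3), ("glasses", 26), ("bg", 0)]).values.sum = 76 := by decide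
  simp [allocate_points_alt]
  rw [hS]
  rw [if_neg (show ¬ t < (76:Int) by omega), if_neg (show ¬ t' < (76:Int) by omega)]

-- ===== VERDICT (by name: the statement is the Claim_ definition above) =====
set_option maxHeartbeats 4000000 in
theorem allocate_points_spec : Claim_equal_allocate_points := by
  unfold Claim_equal_allocate_points
  intro t g _
  unfold Spec_allocate_points
  cases g with
  | false =>
    by_cases h1 : t < 14
    · calc allocate_points t false = allocate_points 0 false := A_tail_false t 0 h1 (by omega)
        _ = allocate_points_alt 0 false := by decide
        _ = allocate_points_alt t false := (alt_tail_false t 0 h1 (by omega)).symm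
    · by_cases h2 : 52 ≤ t
      · calc allocate_points t false = allocate_points 52 false := A_hi_false t 52 h2 (by omega)
          _ = allocate_points_alt 52 false := by decide
          _ = allocate_points_alt t false := (alt_hi_false t 52 h2 (by omega)).symm
      · have hlo : 14 ≤ t := by omega
        have hhi : t ≤ 51 := by omega
        interval_cases t <;> decide
  | true =>
    by_cases h1 : t < 16
    · calc allocate_points t true = allocate_points 0 true := A_tail_true t 0 h1 (by omega)
        _ = allocate_points_alt 0 true := by decide
        _ = allocate_points_alt t true := (alt_tail_true t 0 h1 (by omega)).symm
    · by_cases h2 : 76 ≤ t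
      · calc allocate_points t true = allocate_points 76 true := A_hi_true t 76 h2 (by omega)
          _ = allocate_points_alt 76 true := by decide
          _ = allocate_points_alt t true := (alt_hi_true t 76 h2 (by omega)).symm
      · have hlo : 16 ≤ t := by omega
        have hhi : t ≤ 75 := by omega
        interval_cases t <;> decide
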